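-- pv_equiv track=rewrite | github.com/bushra-lab/Tight-Binding-Model | Code.py | TwoDimSpin
-- ===== SOURCE A (Python) =====
-- per = True
--
-- def TwoDimSpin(size, self_e, bond):
--     self_up = self_e
--     self_down = -1*self_e
--
--     len = size*size;
--     hamil = []
--     row = []
--     for i in range(2*len):
--         for j in range(2*len):
--             row.append(0)
--         hamil.append(row)
--         row = []
--
--     for i in range(len):
--        hamil[i][ i] = self_up;
--        hamil[i + len][i + len] = self_down;
--
--
--     for i in range(len - 1):
--         if((i+1) % size != 0):
--             hamil[i][i + 1] = bond;
--             hamil[i+1][ i] = bond; #//conjugate here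
--
--             hamil[i + len][i + 1 + len] = bond;
--             hamil[i + 1 + len][ i + len] = bond; #// conjugate here
--
--
--     for i in range(len - size):
--         hamil[i + size][ i] = bond;
--         hamil[i][i + size] = bond; #// conjugate here
--
--         hamil[i + size + len][i + len] = bond;
--         hamil[i + len][i + size + len] = bond;
--
--     if per == True:
--         for i in range(size):
--             hamil[i][i + len - size] = bond;
--             hamil[i + len - size][ i] = bond;# // conjugate
--
--             hamil[i * size][(i+1)*size - 1] = bond;
--             hamil[(i+1)*size - 1][i * size] = bond; #// conjugate
--
--             hamil[i + len][ i + len - size + len] = bond;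
--             hamil[i + len - size + len][i + len] = bond; #// conjugate
--
--             hamil[i * size + len][(i+1)*size - 1 + len] = bond;
--             hamil[(i+1)*size - 1 + len][i * size + len] = bond; #//conjugate
--
--
--     return hamil
-- ===== SOURCE B (Python) =====
-- # B: closed-form per-entry formula (row/col adjacency on the torus) mapped over a
-- # comprehension, instead of A's sequence of in-place writes. Objective: simpler/alternative.
-- per = True
--
-- def TwoDimSpin(size, self_e, bond):
--     n = size * size
--
--     def entry(i, j):
--         if (i < n) != (j < n):
--             return 0                      # no coupling between spin blocks
--         a = i if i < n else i - n
--         b = j if j < n else j - n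
--         ra, ca = divmod(a, size)
--         rb, cb = divmod(b, size)
--         if ra == rb and (abs(ca - cb) == 1 or (per and ca + cb == size - 1 and (ca == 0 or cb == 0))):
--             return bond                   # horizontal neighbour (incl. periodic wrap)
--         if ca == cb and (abs(ra - rb) == 1 or (per and ra + rb == size - 1 and (ra == 0 or rb == 0))):
--             return bond                   # vertical neighbour (incl. periodic wrap)
--         if a == b:
--             return self_e if i < n else -self_e
--         return 0
--
--     return [[entry(i, j) for j in range(2 * n)] for i in range(2 * n)]
-- ===== Notes on version B (the rewrite author's own statement) =====
-- stated objective: alternative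
-- what changed: B computes each Hamiltonian entry from a closed-form row/column adjacency formula (divmod per index, torus-neighbour test) inside a single comprehension, instead of A's allocate-then-mutate sequence of five write loops.
import Mathlib
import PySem

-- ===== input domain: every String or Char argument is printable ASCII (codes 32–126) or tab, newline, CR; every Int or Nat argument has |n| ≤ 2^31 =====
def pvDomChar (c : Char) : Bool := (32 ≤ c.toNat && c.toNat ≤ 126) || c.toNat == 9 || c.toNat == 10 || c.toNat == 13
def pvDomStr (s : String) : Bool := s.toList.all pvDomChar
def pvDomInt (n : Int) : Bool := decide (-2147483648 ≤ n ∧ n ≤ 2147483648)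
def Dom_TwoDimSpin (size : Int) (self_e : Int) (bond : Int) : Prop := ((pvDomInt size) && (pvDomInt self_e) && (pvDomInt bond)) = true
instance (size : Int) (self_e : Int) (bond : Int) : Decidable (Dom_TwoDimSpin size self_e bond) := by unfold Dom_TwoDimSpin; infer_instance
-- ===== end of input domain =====

-- B replaces A's allocate-then-mutate write loops by a closed-form per-entry adjacency
-- formula mapped over a comprehension (alternative decomposition, same asymptotic cost).


-- ===== PORT A =====
-- module constant `per = True`
def per : Bool := true

-- `xs[i] = v` (Python list item assignment; exact whenever the index is in range,
-- which is the case on every admitted run — on an out-of-range index Python raises).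
def pvPySet {α : Type} (xs : List α) (i : Int) (v : α) : List α :=
  let k : Int := if i < 0 then i + xs.length else i
  if 0 ≤ k ∧ k < (xs.length : Int) then xs.set k.toNat v else xs

-- `m[i][j] = v` (fetch row i, assign item j; exact when i is in range, as in every admitted run)
def pvSet2 (m : List (List Int)) (i j : Int) (v : Int) : List (List Int) :=
  let k : Int := if i < 0 then i + m.length else i
  if 0 ≤ k ∧ k < (m.length : Int) then m.set k.toNat (pvPySet (m.getD k.toNat []) j v) else m

-- the four loop bodies of A, named so the loops stay recognisable
def aBody1 (len self_up self_down : Int) (h : List (List Int)) (i : Int) : List (List Int) :=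
  pvSet2 (pvSet2 h i i self_up) (i + len) (i + len) self_down

def aBody2 (size len bond : Int) (h : List (List Int)) (i : Int) : List (List Int) :=
  if PySem.Int.mod (i + 1) size ≠ 0 then
    pvSet2 (pvSet2 (pvSet2 (pvSet2 h i (i+1) bond) (i+1) i bond) (i+len) (i+1+len) bond) (i+1+len) (i+len) bond
  else h

def aBody3 (size len bond : Int) (h : List (List Int)) (i : Int) : List (List Int) :=
  pvSet2 (pvSet2 (pvSet2 (pvSet2 h (i+size) i bond) i (i+size) bond) (i+size+len) (i+len) bond) (i+len) (i+size+len) bond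

def aBody4 (size len bond : Int) (h : List (List Int)) (i : Int) : List (List Int) :=
  let h := pvSet2 h i (i+len-size) bond
  let h := pvSet2 h (i+len-size) i bond
  let h := pvSet2 h (i*size) ((i+1)*size-1) bond
  let h := pvSet2 h ((i+1)*size-1) (i*size) bond
  let h := pvSet2 h (i+len) (i+len-size+len) bond
  let h := pvSet2 h (i+len-size+len) (i+len) bond
  let h := pvSet2 h (i*size+len) ((i+1)*size-1+len) bond
  pvSet2 h ((i+1)*size-1+len) (i*size+len) bond

def TwoDimSpin (size : Int) (self_e : Int) (bond : Int) : List (List Int) :=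
  let self_up := self_e
  let self_down := -1 * self_e
  let len := size * size
  -- build the 2len×2len zero matrix by appending
  let st := (PySem.List.pyRange 0 (2*len)).foldl
      (fun (st : List (List Int) × List Int) _ =>
        let row := (PySem.List.pyRange 0 (2*len)).foldl (fun r _ => r ++ [(0:Int)]) st.2
        (st.1 ++ [row], []))
      ([], [])
  let hamil := st.1
  let hamil := (PySem.List.pyRange 0 len).foldl (aBody1 len self_up self_down) hamil
  let hamil := (PySem.List.pyRange 0 (len-1)).foldl (aBody2 size len bond) hamil
  let hamil := (PySem.List.pyRange 0 (len-size)).foldl (aBody3 size len bond) hamil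
  let hamil := if per = true then (PySem.List.pyRange 0 size).foldl (aBody4 size len bond) hamil else hamil
  hamil

-- ===== PORT B =====
-- entry(i, j) of Source B
def pvEntry (size self_e bond n i j : Int) : Int :=
  if (decide (i < n)) != (decide (j < n)) then 0
  else
    let a := if i < n then i else i - n
    let b := if j < n then j else j - n
    let ra := PySem.Int.floordiv a size
    let ca := PySem.Int.mod a size
    let rb := PySem.Int.floordiv b size
    let cb := PySem.Int.mod b size
    if ra = rb ∧ (|ca - cb| = 1 ∨ (per = true ∧ ca + cb = size - 1 ∧ (ca = 0 ∨ cb = 0))) then bond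
    else if ca = cb ∧ (|ra - rb| = 1 ∨ (per = true ∧ ra + rb = size - 1 ∧ (ra = 0 ∨ rb = 0))) then bond
    else if a = b then (if i < n then self_e else -self_e)
    else 0

def TwoDimSpin_alt (size : Int) (self_e : Int) (bond : Int) : List (List Int) :=
  let n := size * size
  (PySem.List.pyRange 0 (2*n)).map (fun i =>
    (PySem.List.pyRange 0 (2*n)).map (fun j => pvEntry size self_e bond n i j))

-- ===== PRECONDITION & SPEC =====
-- Pre_ excludes negative sizes: there A always raises IndexError (the range(len-size)
-- vertical-bond loop writes past the 2·size² rows).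
def Pre_TwoDimSpin (size : Int) (self_e : Int) (bond : Int) : Prop := 0 ≤ size
instance (size : Int) (self_e : Int) (bond : Int) : Decidable (Pre_TwoDimSpin size self_e bond) := by unfold Pre_TwoDimSpin; infer_instance
def pvWitness_TwoDimSpin : Int × Int × Int := (2, 1, 3)

def Spec_TwoDimSpin (size : Int) (self_e : Int) (bond : Int) (out : List (List Int)) : Prop := out = TwoDimSpin_alt size self_e bond
instance (size : Int) (self_e : Int) (bond : Int) (out : List (List Int)) : Decidable (Spec_TwoDimSpin size self_e bond out) := by unfold Spec_TwoDimSpin; infer_instance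

-- ===== CLAIM (what is proved, stated in full; the proofs are below) =====
def Claim_equal_TwoDimSpin : Prop := ∀ (size : Int) (self_e : Int) (bond : Int), Dom_TwoDimSpin size self_e bond → Pre_TwoDimSpin size self_e bond → Spec_TwoDimSpin size self_e bond (TwoDimSpin size self_e bond)

-- ===== LEMMAS AND PROOFS =====

def giM (m : List (List Int)) (a b : Nat) : Int := (m.getD a []).getD b 0
def GoodM (N : Nat) (m : List (List Int)) : Prop := m.length = N ∧ ∀ r ∈ m, r.length = N

theorem pvPySet_length {α : Type} (xs : List α) (i : Int) (v : α) : (pvPySet xs i v).length = xs.length := by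
  unfold pvPySet
  by_cases hi : i < 0 <;> simp only [hi, if_true, if_false] <;> split <;> simp

theorem pvPySet_natCast {α : Type} (xs : List α) (i : Nat) (v : α) (h : i < xs.length) :
    pvPySet xs (↑i) v = xs.set i v := by
  unfold pvPySet
  have h1 : ¬ ((i:Int) < 0) := by omega
  simp only [h1, if_false]
  rw [if_pos (by constructor <;> omega)]
  simp

theorem goodM_setBranch {N : Nat} {m : List (List Int)} (hg : GoodM N m) (k j : Int) (v : Int) :
    GoodM N (if 0 ≤ k ∧ k < (m.length:Int) then m.set k.toNat (pvPySet (m.getD k.toNat []) j v) else m) := by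
  obtain ⟨hl, hr⟩ := hg
  split
  · rename_i hc
    refine ⟨by simp [hl], ?_⟩
    intro r hrmem
    rcases List.mem_or_eq_of_mem_set hrmem with h | h
    · exact hr r h
    · subst h
      rw [pvPySet_length]
      have ht : k.toNat < m.length := by omega
      rw [List.getD_eq_getElem _ _ ht]
      exact hr _ (List.getElem_mem ht)
  · exact ⟨hl, hr⟩

theorem goodM_pvSet2 {N : Nat} {m : List (List Int)} (hg : GoodM N m) (i j : Int) (v : Int) :
    GoodM N (pvSet2 m i j v) := by
  unfold pvSet2
  by_cases hi : i < 0 <;> simp only [hi, if_true, if_false] <;> exact goodM_setBranch hg _ j v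

theorem giM_pvSet2 {N : Nat} {m : List (List Int)} (hg : GoodM N m) (i j a b : Nat)
    (hi : i < N) (hj : j < N) (ha : a < N) (hb : b < N) (v : Int) :
    giM (pvSet2 m ↑i ↑j v) a b = if a = i ∧ b = j then v else giM m a b := by
  obtain ⟨hl, hr⟩ := hg
  unfold pvSet2
  have h1 : ¬ ((i:Int) < 0) := by omega
  simp only [h1, if_false]
  rw [if_pos (by constructor <;> omega)]
  have hiN : (i:Int).toNat = i := by omega
  rw [hiN]
  have hilt : i < m.length := by omega
  have halt : a < m.length := by omega
  have hrlen : (m[i]'hilt).length = N := hr _ (List.getElem_mem hilt)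
  unfold giM
  rw [List.getD_eq_getElem m [] hilt, pvPySet_natCast _ _ _ (by omega)]
  rw [List.getD_eq_getElem (l := m.set i ((m[i]'hilt).set j v)) (d := [])
      (by rw [List.length_set]; omega)]
  rw [List.getElem_set]
  by_cases hia : i = a
  · subst hia
    rw [if_pos rfl]
    rw [List.getD_eq_getElem (l := (m[i]'hilt).set j v) (d := 0) (by rw [List.length_set]; omega)]
    rw [List.getElem_set]
    by_cases hjb : j = b
    · subst hjb; simp
    · rw [if_neg hjb]
      have hne : ¬ (i = i ∧ b = j) := by tauto
      rw [if_neg hne]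
      rw [List.getD_eq_getElem (l := m) (d := []) hilt,
          List.getD_eq_getElem (l := (m[i]'hilt)) (d := 0) (by omega)]
  · rw [if_neg hia]
    have hne : ¬ (a = i ∧ b = j) := by tauto
    rw [if_neg hne]
    rw [List.getD_eq_getElem (l := m) (d := []) halt]

theorem goodM_foldl {β : Type} {N : Nat} (body : List (List Int) → β → List (List Int))
    (hbody : ∀ m x, GoodM N m → GoodM N (body m x)) (l : List β) (m : List (List Int)) (hg : GoodM N m) :
    GoodM N (l.foldl body m) := by
  induction l generalizing m with
  | nil => exact hg
  | cons x xs ih => exact ih _ (hbody m x hg)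

theorem rowFold (l : List Int) (acc : List Int) :
    l.foldl (fun r _ => r ++ [(0:Int)]) acc = acc ++ List.replicate l.length 0 := by
  induction l generalizing acc with
  | nil => simp
  | cons x xs ih => simp [ih, List.replicate_succ]

theorem initChar (l1 l2 : List Int) (acc : List (List Int)) :
    l1.foldl (fun (st : List (List Int) × List Int) _ =>
        (st.1 ++ [l2.foldl (fun r _ => r ++ [(0:Int)]) st.2], [])) (acc, ([]:List Int))
      = (acc ++ List.replicate l1.length (List.replicate l2.length 0), []) := by
  induction l1 generalizing acc with
  | nil => simp
  | cons x xs ih =>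
    rw [List.foldl_cons]
    have hrow : l2.foldl (fun r _ => r ++ [(0:Int)]) ([]:List Int) = List.replicate l2.length 0 := by
      simpa using rowFold l2 []
    rw [show ((acc ++ [l2.foldl (fun r _ => r ++ [(0:Int)]) ([]:List Int)], ([]:List Int)) : List (List Int) × List Int)
          = (acc ++ [List.replicate l2.length 0], []) from by rw [hrow]]
    rw [ih]
    simp [List.replicate_succ]

theorem goodM_replicate (N : Nat) : GoodM N (List.replicate N (List.replicate N (0:Int))) := by
  refine ⟨by simp, ?_⟩
  intro r hr
  rw [List.eq_of_mem_replicate hr]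
  simp

theorem giM_replicate (N a b : Nat) : giM (List.replicate N (List.replicate N (0:Int))) a b = 0 := by
  unfold giM
  rcases lt_or_ge a N with h | h
  · rw [List.getD_eq_getElem (l := List.replicate N (List.replicate N (0:Int))) (d := []) (by simpa using h),
        List.getElem_replicate]
    rcases lt_or_ge b N with h2 | h2
    · rw [List.getD_eq_getElem (l := List.replicate N (0:Int)) (d := 0) (by simpa using h2),
          List.getElem_replicate]
    · rw [List.getD_eq_default (l := List.replicate N (0:Int)) (d := 0) (by simpa using h2)]
  · rw [List.getD_eq_default (l := List.replicate N (List.replicate N (0:Int))) (d := []) (by simpa using h)]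
    simp

theorem goodM_aBody1 {L : Nat} (su sd : Int) (m : List (List Int)) (x : Int) (hg : GoodM (2*L) m) :
    GoodM (2*L) (aBody1 ↑L su sd m x) := by
  unfold aBody1; exact goodM_pvSet2 (goodM_pvSet2 hg _ _ _) _ _ _

theorem char1 (L : Nat) (su sd : Int) (k : Nat) (hk : k ≤ L) (m : List (List Int)) (hg : GoodM (2*L) m)
    (a b : Nat) (ha : a < 2*L) (hb : b < 2*L) :
    giM (((List.range k).map (fun t : Nat => (t:Int))).foldl (aBody1 ↑L su sd) m) a b
      = if a = b ∧ a < k then su else if a = b ∧ L ≤ a ∧ a < L + k then sd else giM m a b := by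
  induction k with
  | zero => simp
  | succ k ih =>
    rw [List.range_succ, List.map_append, List.foldl_append]
    have hMk : GoodM (2*L) (((List.range k).map (fun t : Nat => (t:Int))).foldl (aBody1 ↑L su sd) m) :=
      goodM_foldl _ (fun m x hgm => goodM_aBody1 su sd m x hgm) _ _ hg
    rw [List.map_cons, List.map_nil, List.foldl_cons, List.foldl_nil]
    rw [show ∀ (h : List (List Int)) (i : Int), aBody1 (↑L) su sd h i
          = pvSet2 (pvSet2 h i i su) (i + ↑L) (i + ↑L) sd from fun _ _ => rfl]
    have hc1 : ((k:Int) + (L:Int)) = ((k + L : Nat) : Int) := by push_cast; ring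
    rw [hc1]
    rw [giM_pvSet2 (goodM_pvSet2 hMk _ _ _) (k+L) (k+L) a b (by omega) (by omega) ha hb sd]
    rw [giM_pvSet2 hMk k k a b (by omega) (by omega) ha hb su]
    rw [ih (by omega)]
    split_ifs <;> first | rfl | omega

theorem goodM_aBody2 {L : Nat} (s bond : Int) (m : List (List Int)) (x : Int) (hg : GoodM (2*L) m) :
    GoodM (2*L) (aBody2 s ↑L bond m x) := by
  unfold aBody2; split
  · exact goodM_pvSet2 (goodM_pvSet2 (goodM_pvSet2 (goodM_pvSet2 hg _ _ _) _ _ _) _ _ _) _ _ _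
  · exact hg

theorem char2 (s L : Nat) (bond : Int) (k : Nat) (hk : k + 1 ≤ L) (m : List (List Int))
    (hg : GoodM (2*L) m) (a b : Nat) (ha : a < 2*L) (hb : b < 2*L) :
    giM (((List.range k).map (fun t : Nat => (t:Int))).foldl (aBody2 ↑s ↑L bond) m) a b
      = if (∃ i < k, (i+1) % s ≠ 0 ∧ ((a=i∧b=i+1)∨(a=i+1∧b=i)∨(a=i+L∧b=i+1+L)∨(a=i+1+L∧b=i+L)))
        then bond else giM m a b := by
  induction k with
  | zero => simp
  | succ k ih =>
    rw [List.range_succ, List.map_append, List.foldl_append]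
    have hMk : GoodM (2*L) (((List.range k).map (fun t : Nat => (t:Int))).foldl (aBody2 ↑s ↑L bond) m) :=
      goodM_foldl _ (fun m x hgm => goodM_aBody2 s bond m x hgm) _ _ hg
    rw [List.map_cons, List.map_nil, List.foldl_cons, List.foldl_nil]
    rw [show ∀ (h : List (List Int)) (i : Int), aBody2 (↑s) (↑L) bond h i
          = (if PySem.Int.mod (i + 1) ↑s ≠ 0 then
              pvSet2 (pvSet2 (pvSet2 (pvSet2 h i (i+1) bond) (i+1) i bond) (i+L) (i+1+L) bond) (i+1+L) (i+L) bond
            else h) from fun _ _ => rfl]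
    have hm1 : ((k:Int) + 1) = ((k + 1 : Nat) : Int) := by push_cast; ring
    rw [hm1, PySem.Int.mod_natCast]
    have hc2 : ((k:Int) + (L:Int)) = ((k + L : Nat) : Int) := by push_cast; ring
    have hc3 : (((k+1 : Nat):Int) + (L:Int)) = ((k + 1 + L : Nat) : Int) := by push_cast; ring
    by_cases hmod : (k+1) % s = 0
    · have hcond : (((k+1) % s : Nat):Int) = 0 := by exact_mod_cast hmod
      rw [if_neg (show ¬((((k+1) % s : Nat):Int) ≠ 0) from fun h => h hcond)]
      rw [ih (by omega)]
      have hiff : (∃ i < k, (i+1) % s ≠ 0 ∧ ((a=i∧b=i+1)∨(a=i+1∧b=i)∨(a=i+L∧b=i+1+L)∨(a=i+1+L∧b=i+L)))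
          ↔ (∃ i < k+1, (i+1) % s ≠ 0 ∧ ((a=i∧b=i+1)∨(a=i+1∧b=i)∨(a=i+L∧b=i+1+L)∨(a=i+1+L∧b=i+L))) := by
        constructor
        · rintro ⟨i, hi, h2, h3⟩; exact ⟨i, by omega, h2, h3⟩
        · rintro ⟨i, hi, h2, h3⟩
          rcases Nat.lt_or_ge i k with h | h
          · exact ⟨i, h, h2, h3⟩
          · exfalso; have : i = k := by omega
            subst this; exact h2 hmod
      rw [if_congr hiff rfl rfl]
    · rw [if_pos (show (((k+1) % s : Nat):Int) ≠ 0 from by exact_mod_cast hmod)]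
      rw [hc2, hc3]
      rw [giM_pvSet2 (goodM_pvSet2 (goodM_pvSet2 (goodM_pvSet2 hMk _ _ _) _ _ _) _ _ _)
            (k+1+L) (k+L) a b (by omega) (by omega) ha hb bond]
      rw [giM_pvSet2 (goodM_pvSet2 (goodM_pvSet2 hMk _ _ _) _ _ _)
            (k+L) (k+1+L) a b (by omega) (by omega) ha hb bond]
      rw [giM_pvSet2 (goodM_pvSet2 hMk _ _ _) (k+1) k a b (by omega) (by omega) ha hb bond]
      rw [giM_pvSet2 hMk k (k+1) a b (by omega) (by omega) ha hb bond]
      rw [ih (by omega)]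
      by_cases hE : (∃ i < k+1, (i+1) % s ≠ 0 ∧ ((a=i∧b=i+1)∨(a=i+1∧b=i)∨(a=i+L∧b=i+1+L)∨(a=i+1+L∧b=i+L)))
      · rw [if_pos hE]
        obtain ⟨i, hi, h2, h3⟩ := hE
        rcases Nat.lt_or_ge i k with hik | hik
        · have hEk : (∃ i < k, (i+1) % s ≠ 0 ∧ ((a=i∧b=i+1)∨(a=i+1∧b=i)∨(a=i+L∧b=i+1+L)∨(a=i+1+L∧b=i+L))) :=
            ⟨i, hik, h2, h3⟩
          rw [if_pos hEk]
          split_ifs <;> rfl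
        · have : i = k := by omega
          subst this
          rcases h3 with h3 | h3 | h3 | h3 <;> split_ifs <;> first | rfl | omega
      · rw [if_neg hE]
        have hnmod : (k+1) % s ≠ 0 := hmod
        have n1 : ¬ (a = k ∧ b = k+1) := fun hc => hE ⟨k, by omega, hnmod, Or.inl hc⟩
        have n2 : ¬ (a = k+1 ∧ b = k) := fun hc => hE ⟨k, by omega, hnmod, Or.inr (Or.inl hc)⟩
        have n3 : ¬ (a = k+L ∧ b = k+1+L) := fun hc => hE ⟨k, by omega, hnmod, Or.inr (Or.inr (Or.inl hc))⟩
        have n4 : ¬ (a = k+1+L ∧ b = k+L) := fun hc => hE ⟨k, by omega, hnmod, Or.inr (Or.inr (Or.inr hc))⟩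
        have nEk : ¬ (∃ i < k, (i+1) % s ≠ 0 ∧ ((a=i∧b=i+1)∨(a=i+1∧b=i)∨(a=i+L∧b=i+1+L)∨(a=i+1+L∧b=i+L))) :=
          fun ⟨i, hi, h2, h3⟩ => hE ⟨i, by omega, h2, h3⟩
        rw [if_neg n4, if_neg n3, if_neg n2, if_neg n1, if_neg nEk]

theorem goodM_aBody3 {L : Nat} (s bond : Int) (m : List (List Int)) (x : Int) (hg : GoodM (2*L) m) :
    GoodM (2*L) (aBody3 s ↑L bond m x) := by
  unfold aBody3
  exact goodM_pvSet2 (goodM_pvSet2 (goodM_pvSet2 (goodM_pvSet2 hg _ _ _) _ _ _) _ _ _) _ _ _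

theorem char3 (s L : Nat) (bond : Int) (k : Nat) (hk : k + s ≤ L) (m : List (List Int))
    (hg : GoodM (2*L) m) (a b : Nat) (ha : a < 2*L) (hb : b < 2*L) :
    giM (((List.range k).map (fun t : Nat => (t:Int))).foldl (aBody3 ↑s ↑L bond) m) a b
      = if (∃ i < k, ((a=i+s∧b=i)∨(a=i∧b=i+s)∨(a=i+s+L∧b=i+L)∨(a=i+L∧b=i+s+L)))
        then bond else giM m a b := by
  induction k with
  | zero => simp
  | succ k ih =>
    rw [List.range_succ, List.map_append, List.foldl_append]
    have hMk : GoodM (2*L) (((List.range k).map (fun t : Nat => (t:Int))).foldl (aBody3 ↑s ↑L bond) m) :=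
      goodM_foldl _ (fun m x hgm => goodM_aBody3 s bond m x hgm) _ _ hg
    rw [List.map_cons, List.map_nil, List.foldl_cons, List.foldl_nil]
    rw [show ∀ (h : List (List Int)) (i : Int), aBody3 (↑s) (↑L) bond h i
          = pvSet2 (pvSet2 (pvSet2 (pvSet2 h (i+s) i bond) i (i+s) bond) (i+s+L) (i+L) bond) (i+L) (i+s+L) bond
          from fun _ _ => rfl]
    have hc1 : ((k:Int) + (s:Int)) = ((k + s : Nat) : Int) := by push_cast; ring
    have hc2 : ((k:Int) + (L:Int)) = ((k + L : Nat) : Int) := by push_cast; ring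
    have hc3 : (((k+s : Nat):Int) + (L:Int)) = ((k + s + L : Nat) : Int) := by push_cast; ring
    rw [hc1, hc2, hc3]
    rw [giM_pvSet2 (goodM_pvSet2 (goodM_pvSet2 (goodM_pvSet2 hMk _ _ _) _ _ _) _ _ _)
          (k+L) (k+s+L) a b (by omega) (by omega) ha hb bond]
    rw [giM_pvSet2 (goodM_pvSet2 (goodM_pvSet2 hMk _ _ _) _ _ _)
          (k+s+L) (k+L) a b (by omega) (by omega) ha hb bond]
    rw [giM_pvSet2 (goodM_pvSet2 hMk _ _ _) k (k+s) a b (by omega) (by omega) ha hb bond]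
    rw [giM_pvSet2 hMk (k+s) k a b (by omega) (by omega) ha hb bond]
    rw [ih (by omega)]
    by_cases hE : (∃ i < k+1, ((a=i+s∧b=i)∨(a=i∧b=i+s)∨(a=i+s+L∧b=i+L)∨(a=i+L∧b=i+s+L)))
    · rw [if_pos hE]
      obtain ⟨i, hi, h3⟩ := hE
      rcases Nat.lt_or_ge i k with hik | hik
      · have hEk : (∃ i < k, ((a=i+s∧b=i)∨(a=i∧b=i+s)∨(a=i+s+L∧b=i+L)∨(a=i+L∧b=i+s+L))) := ⟨i, hik, h3⟩
        rw [if_pos hEk]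
        split_ifs <;> rfl
      · have : i = k := by omega
        subst this
        rcases h3 with h3 | h3 | h3 | h3 <;> split_ifs <;> first | rfl | omega
    · rw [if_neg hE]
      have n1 : ¬ (a = k+s ∧ b = k) := fun hc => hE ⟨k, by omega, Or.inl hc⟩
      have n2 : ¬ (a = k ∧ b = k+s) := fun hc => hE ⟨k, by omega, Or.inr (Or.inl hc)⟩
      have n3 : ¬ (a = k+s+L ∧ b = k+L) := fun hc => hE ⟨k, by omega, Or.inr (Or.inr (Or.inl hc))⟩
      have n4 : ¬ (a = k+L ∧ b = k+s+L) := fun hc => hE ⟨k, by omega, Or.inr (Or.inr (Or.inr hc))⟩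
      have nEk : ¬ (∃ i < k, ((a=i+s∧b=i)∨(a=i∧b=i+s)∨(a=i+s+L∧b=i+L)∨(a=i+L∧b=i+s+L))) :=
        fun ⟨i, hi, h3⟩ => hE ⟨i, by omega, h3⟩
      rw [if_neg n4, if_neg n3, if_neg n2, if_neg n1, if_neg nEk]

theorem goodM_aBody4 {L : Nat} (s bond : Int) (m : List (List Int)) (x : Int) (hg : GoodM (2*L) m) :
    GoodM (2*L) (aBody4 s ↑L bond m x) := by
  unfold aBody4
  exact goodM_pvSet2 (goodM_pvSet2 (goodM_pvSet2 (goodM_pvSet2 (goodM_pvSet2 (goodM_pvSet2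
    (goodM_pvSet2 (goodM_pvSet2 hg _ _ _) _ _ _) _ _ _) _ _ _) _ _ _) _ _ _) _ _ _) _ _ _

set_option maxHeartbeats 1600000 in
theorem char4 (s L : Nat) (hs : 1 ≤ s) (hL : L = s*s) (bond : Int) (k : Nat) (hk : k ≤ s)
    (m : List (List Int)) (hg : GoodM (2*L) m) (a b : Nat) (ha : a < 2*L) (hb : b < 2*L) :
    giM (((List.range k).map (fun t : Nat => (t:Int))).foldl (aBody4 ↑s ↑L bond) m) a b
      = if (∃ i < k, ((a=i∧b=i+L-s)∨(a=i+L-s∧b=i)∨(a=i*s∧b=(i+1)*s-1)∨(a=(i+1)*s-1∧b=i*s)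
            ∨(a=i+L∧b=i+L-s+L)∨(a=i+L-s+L∧b=i+L)∨(a=i*s+L∧b=(i+1)*s-1+L)∨(a=(i+1)*s-1+L∧b=i*s+L)))
        then bond else giM m a b := by
  have hsL : s ≤ L := by rw [hL]; exact Nat.le_mul_of_pos_left s (by omega)
  induction k with
  | zero => simp
  | succ k ih =>
    have hs1 : 1 ≤ (k+1)*s := by have := Nat.mul_pos (show 0 < k+1 by omega) (show 0 < s by omega); omega
    have hmul : (k+1)*s ≤ L := by rw [hL]; exact Nat.mul_le_mul (by omega) (by omega)
    have hmul2 : k*s < (k+1)*s := by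
      have := (Nat.mul_lt_mul_right (show 0 < s by omega)).mpr (show k < k+1 by omega)
      exact this
    rw [List.range_succ, List.map_append, List.foldl_append]
    have hMk : GoodM (2*L) (((List.range k).map (fun t : Nat => (t:Int))).foldl (aBody4 ↑s ↑L bond) m) :=
      goodM_foldl _ (fun m x hgm => goodM_aBody4 s bond m x hgm) _ _ hg
    rw [List.map_cons, List.map_nil, List.foldl_cons, List.foldl_nil]
    rw [show ∀ (h : List (List Int)) (i : Int), aBody4 (↑s) (↑L) bond h i
          = pvSet2 (pvSet2 (pvSet2 (pvSet2 (pvSet2 (pvSet2 (pvSet2 (pvSet2 h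
              i (i+↑L-↑s) bond) (i+↑L-↑s) i bond) (i*↑s) ((i+1)*↑s-1) bond) ((i+1)*↑s-1) (i*↑s) bond)
              (i+↑L) (i+↑L-↑s+↑L) bond) (i+↑L-↑s+↑L) (i+↑L) bond) (i*↑s+↑L) ((i+1)*↑s-1+↑L) bond)
              ((i+1)*↑s-1+↑L) (i*↑s+↑L) bond from fun _ _ => rfl]
    have e1 : ((k:Int) + ↑L - ↑s) = ((k + L - s : Nat) : Int) := by omega
    have e2 : ((k:Int) * ↑s) = ((k * s : Nat) : Int) := by push_cast; ring
    have e3 : (((k:Int) + 1) * ↑s - 1) = (((k+1) * s - 1 : Nat) : Int) := by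
      rw [Nat.cast_sub hs1]; push_cast; ring
    have e4 : ((k:Int) + ↑L) = ((k + L : Nat) : Int) := by omega
    have e5 : (((k + L - s : Nat) : Int) + ↑L) = ((k + L - s + L : Nat) : Int) := by omega
    have e6 : (((k * s : Nat) : Int) + ↑L) = ((k * s + L : Nat) : Int) := by omega
    have e7 : ((((k+1) * s - 1 : Nat) : Int) + ↑L) = (((k+1) * s - 1 + L : Nat) : Int) := by omega
    rw [e1, e2, e3, e4, e5, e6, e7]
    rw [giM_pvSet2 (goodM_pvSet2 (goodM_pvSet2 (goodM_pvSet2 (goodM_pvSet2 (goodM_pvSet2 (goodM_pvSet2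
          (goodM_pvSet2 hMk _ _ _) _ _ _) _ _ _) _ _ _) _ _ _) _ _ _) _ _ _)
          ((k+1)*s-1+L) (k*s+L) a b (by omega) (by omega) ha hb bond]
    rw [giM_pvSet2 (goodM_pvSet2 (goodM_pvSet2 (goodM_pvSet2 (goodM_pvSet2 (goodM_pvSet2
          (goodM_pvSet2 hMk _ _ _) _ _ _) _ _ _) _ _ _) _ _ _) _ _ _)
          (k*s+L) ((k+1)*s-1+L) a b (by omega) (by omega) ha hb bond]
    rw [giM_pvSet2 (goodM_pvSet2 (goodM_pvSet2 (goodM_pvSet2 (goodM_pvSet2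
          (goodM_pvSet2 hMk _ _ _) _ _ _) _ _ _) _ _ _) _ _ _)
          (k+L-s+L) (k+L) a b (by omega) (by omega) ha hb bond]
    rw [giM_pvSet2 (goodM_pvSet2 (goodM_pvSet2 (goodM_pvSet2 (goodM_pvSet2 hMk _ _ _) _ _ _) _ _ _) _ _ _)
          (k+L) (k+L-s+L) a b (by omega) (by omega) ha hb bond]
    rw [giM_pvSet2 (goodM_pvSet2 (goodM_pvSet2 (goodM_pvSet2 hMk _ _ _) _ _ _) _ _ _)
          ((k+1)*s-1) (k*s) a b (by omega) (by omega) ha hb bond]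
    rw [giM_pvSet2 (goodM_pvSet2 (goodM_pvSet2 hMk _ _ _) _ _ _)
          (k*s) ((k+1)*s-1) a b (by omega) (by omega) ha hb bond]
    rw [giM_pvSet2 (goodM_pvSet2 hMk _ _ _) (k+L-s) k a b (by omega) (by omega) ha hb bond]
    rw [giM_pvSet2 hMk k (k+L-s) a b (by omega) (by omega) ha hb bond]
    rw [ih (by omega)]
    by_cases hE : (∃ i < k+1, ((a=i∧b=i+L-s)∨(a=i+L-s∧b=i)∨(a=i*s∧b=(i+1)*s-1)∨(a=(i+1)*s-1∧b=i*s)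
            ∨(a=i+L∧b=i+L-s+L)∨(a=i+L-s+L∧b=i+L)∨(a=i*s+L∧b=(i+1)*s-1+L)∨(a=(i+1)*s-1+L∧b=i*s+L)))
    · rw [if_pos hE]
      obtain ⟨i, hi, h3⟩ := hE
      rcases Nat.lt_or_ge i k with hik | hik
      · have hEk : (∃ i < k, ((a=i∧b=i+L-s)∨(a=i+L-s∧b=i)∨(a=i*s∧b=(i+1)*s-1)∨(a=(i+1)*s-1∧b=i*s)
            ∨(a=i+L∧b=i+L-s+L)∨(a=i+L-s+L∧b=i+L)∨(a=i*s+L∧b=(i+1)*s-1+L)∨(a=(i+1)*s-1+L∧b=i*s+L))) :=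
          ⟨i, hik, h3⟩
        rw [if_pos hEk]
        split_ifs <;> rfl
      · have : i = k := by omega
        subst this
        rcases h3 with h3|h3|h3|h3|h3|h3|h3|h3 <;> split_ifs <;> first | rfl | omega
    · rw [if_neg hE]
      have n1 : ¬ (a = k ∧ b = k+L-s) := fun hc => hE ⟨k, by omega, Or.inl hc⟩
      have n2 : ¬ (a = k+L-s ∧ b = k) := fun hc => hE ⟨k, by omega, Or.inr (Or.inl hc)⟩
      have n3 : ¬ (a = k*s ∧ b = (k+1)*s-1) := fun hc => hE ⟨k, by omega, Or.inr (Or.inr (Or.inl hc))⟩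
      have n4 : ¬ (a = (k+1)*s-1 ∧ b = k*s) := fun hc => hE ⟨k, by omega, Or.inr (Or.inr (Or.inr (Or.inl hc)))⟩
      have n5 : ¬ (a = k+L ∧ b = k+L-s+L) := fun hc => hE ⟨k, by omega, Or.inr (Or.inr (Or.inr (Or.inr (Or.inl hc))))⟩
      have n6 : ¬ (a = k+L-s+L ∧ b = k+L) := fun hc => hE ⟨k, by omega, Or.inr (Or.inr (Or.inr (Or.inr (Or.inr (Or.inl hc)))))⟩
      have n7 : ¬ (a = k*s+L ∧ b = (k+1)*s-1+L) := fun hc => hE ⟨k, by omega, Or.inr (Or.inr (Or.inr (Or.inr (Or.inr (Or.inr (Or.inl hc))))))⟩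
      have n8 : ¬ (a = (k+1)*s-1+L ∧ b = k*s+L) := fun hc => hE ⟨k, by omega, Or.inr (Or.inr (Or.inr (Or.inr (Or.inr (Or.inr (Or.inr hc))))))⟩
      have nEk : ¬ (∃ i < k, ((a=i∧b=i+L-s)∨(a=i+L-s∧b=i)∨(a=i*s∧b=(i+1)*s-1)∨(a=(i+1)*s-1∧b=i*s)
            ∨(a=i+L∧b=i+L-s+L)∨(a=i+L-s+L∧b=i+L)∨(a=i*s+L∧b=(i+1)*s-1+L)∨(a=(i+1)*s-1+L∧b=i*s+L))) :=
        fun ⟨i, hi, h3⟩ => hE ⟨i, by omega, h3⟩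
      rw [if_neg n8, if_neg n7, if_neg n6, if_neg n5, if_neg n4, if_neg n3, if_neg n2, if_neg n1, if_neg nEk]

theorem divmod_mul_add (s q r : Nat) (hs : 0 < s) (hr : r < s) :
    (s*q + r)/s = q ∧ (s*q + r)%s = r := by
  constructor
  · rw [Nat.mul_add_div hs, Nat.div_eq_of_lt hr]; omega
  · rw [Nat.mul_add_mod]; exact Nat.mod_eq_of_lt hr

theorem horiz_iff (s a b : Nat) (hs : 1 ≤ s) (ha : a < s*s) (hb : b < s*s) :
    ((∃ i < s*s-1, (i+1)%s ≠ 0 ∧ ((a=i∧b=i+1)∨(a=i+1∧b=i)))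
      ∨ (∃ i < s, (a=i*s∧b=(i+1)*s-1)∨(a=(i+1)*s-1∧b=i*s)))
    ↔ (a/s = b/s ∧ ((a%s = b%s+1 ∨ b%s = a%s+1) ∨ (a%s + b%s = s-1 ∧ (a%s = 0 ∨ b%s = 0)))) := by
  have hs0 : 0 < s := hs
  have hda := Nat.div_add_mod a s
  have hdb := Nat.div_add_mod b s
  have hma : a % s < s := Nat.mod_lt _ hs0
  have hmb : b % s < s := Nat.mod_lt _ hs0
  constructor
  · rintro (⟨i, hi, hmod, (⟨rfl, rfl⟩ | ⟨rfl, rfl⟩)⟩ | ⟨i, hi, (⟨rfl, rfl⟩ | ⟨rfl, rfl⟩)⟩)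
    -- a = i, b = i + 1
    · have hnd : ¬ (s ∣ a+1) := by rw [Nat.dvd_iff_mod_eq_zero]; exact hmod
      have hdiv : (a+1)/s = a/s := by rw [Nat.succ_div, if_neg hnd]; omega
      have hlt : a % s + 1 < s := by
        by_contra hcon
        have hmeq : a % s + 1 = s := by omega
        have hshape : a + 1 = s*(a/s) + (a%s+1) := by omega
        have : (a+1) % s = 0 := by
          rw [hshape, hmeq, ← Nat.mul_succ, Nat.mul_comm]; exact Nat.mul_mod_left _ _
        exact hmod this
      have hshape : a + 1 = s*(a/s) + (a%s+1) := by omega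
      have hmod2 : (a+1) % s = a%s + 1 := by
        rw [hshape]; exact (divmod_mul_add s (a/s) (a%s+1) hs0 hlt).2
      omega
    -- a = i+1, b = i
    · have hnd : ¬ (s ∣ b+1) := by rw [Nat.dvd_iff_mod_eq_zero]; exact hmod
      have hdiv : (b+1)/s = b/s := by rw [Nat.succ_div, if_neg hnd]; omega
      have hlt : b % s + 1 < s := by
        by_contra hcon
        have hmeq : b % s + 1 = s := by omega
        have hshape : b + 1 = s*(b/s) + (b%s+1) := by omega
        have : (b+1) % s = 0 := by
          rw [hshape, hmeq, ← Nat.mul_succ, Nat.mul_comm]; exact Nat.mul_mod_left _ _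
        exact hmod this
      have hshape : b + 1 = s*(b/s) + (b%s+1) := by omega
      have hmod2 : (b+1) % s = b%s + 1 := by
        rw [hshape]; exact (divmod_mul_add s (b/s) (b%s+1) hs0 hlt).2
      omega
    -- a = i*s, b = (i+1)*s-1
    · have hc1 : i*s = s*i + 0 := by ring
      have hc2 : (i+1)*s = s*i + s := by ring
      have hsub : (i+1)*s - 1 = s*i + (s-1) := by omega
      have hea := divmod_mul_add s i 0 hs0 (by omega)
      have heb := divmod_mul_add s i (s-1) hs0 (by omega)
      rw [hc1] at *
      rw [hsub] at *
      omega
    -- a = (i+1)*s-1, b = i*s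
    · have hc1 : i*s = s*i + 0 := by ring
      have hc2 : (i+1)*s = s*i + s := by ring
      have hsub : (i+1)*s - 1 = s*i + (s-1) := by omega
      have hea := divmod_mul_add s i 0 hs0 (by omega)
      have heb := divmod_mul_add s i (s-1) hs0 (by omega)
      rw [hc1] at *
      rw [hsub] at *
      omega
  · rintro ⟨hq, (hadj | ⟨hsum, hz⟩)⟩
    · rcases hadj with hba | hab
      -- a % s = b % s + 1, so a = b + 1 : witness i := b
      · left
        have hab1 : a = b + 1 := by
          have h1 : s * (a/s) = s * (b/s) := by rw [hq]
          omega
        refine ⟨b, by omega, ?_, Or.inr ⟨by omega, rfl⟩⟩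
        have hshape : b + 1 = s*(b/s) + (b%s+1) := by
          have h1 : s * (a/s) = s * (b/s) := by rw [hq]
          omega
        rw [hshape, (divmod_mul_add s (b/s) (b%s+1) hs0 (by omega)).2]
        omega
      -- b % s = a % s + 1, so b = a + 1 : witness i := a
      · left
        have hab1 : b = a + 1 := by
          have h1 : s * (a/s) = s * (b/s) := by rw [hq]
          omega
        refine ⟨a, by omega, ?_, Or.inl ⟨rfl, by omega⟩⟩
        have hshape : a + 1 = s*(a/s) + (a%s+1) := by
          have h1 : s * (a/s) = s * (b/s) := by rw [hq]
          omega
        rw [hshape, (divmod_mul_add s (a/s) (a%s+1) hs0 (by omega)).2]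
        omega
    · right
      have h1 : s * (a/s) = s * (b/s) := by rw [hq]
      have hc1 : (a/s)*s = s*(a/s) := by ring
      have hc2 : (a/s+1)*s = s*(a/s) + s := by ring
      rcases hz with hz | hz
      -- a % s = 0, b % s = s - 1
      · exact ⟨a/s, by
          have : a/s < s := by
            rw [Nat.div_lt_iff_lt_mul hs0]; exact ha
          exact this,
          Or.inl ⟨by omega, by omega⟩⟩
      -- b % s = 0, a % s = s - 1
      · exact ⟨a/s, by
          have : a/s < s := by
            rw [Nat.div_lt_iff_lt_mul hs0]; exact ha
          exact this,
          Or.inr ⟨by omega, by omega⟩⟩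

theorem vert_iff (s a b : Nat) (hs : 1 ≤ s) (ha : a < s*s) (hb : b < s*s) :
    ((∃ i < s*s-s, ((a=i+s∧b=i)∨(a=i∧b=i+s)))
      ∨ (∃ i < s, ((a=i∧b=i+s*s-s)∨(a=i+s*s-s∧b=i))))
    ↔ (a%s = b%s ∧ ((a/s = b/s+1 ∨ b/s = a/s+1) ∨ (a/s + b/s = s-1 ∧ (a/s = 0 ∨ b/s = 0)))) := by
  have hs0 : 0 < s := hs
  have hda := Nat.div_add_mod a s
  have hdb := Nat.div_add_mod b s
  have hma : a % s < s := Nat.mod_lt _ hs0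
  have hmb : b % s < s := Nat.mod_lt _ hs0
  have hss : s ≤ s*s := Nat.le_mul_of_pos_left s hs0
  have hmsub : s*(s-1) = s*s - s := by rw [Nat.mul_sub_one]
  constructor
  · rintro (⟨i, hi, (⟨rfl, rfl⟩ | ⟨rfl, rfl⟩)⟩ | ⟨i, hi, (⟨rfl, rfl⟩ | ⟨rfl, rfl⟩)⟩)
    -- a = b + s
    · have hd : (b+s)/s = b/s + 1 := Nat.add_div_right b hs0
      have hm : (b+s)%s = b%s := Nat.add_mod_right b s
      omega
    -- b = a + s
    · have hd : (a+s)/s = a/s + 1 := Nat.add_div_right a hs0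
      have hm : (a+s)%s = a%s := Nat.add_mod_right a s
      omega
    -- a = i (i < s), b = i + s*s - s
    · have hshape : a + s*s - s = s*(s-1) + a := by omega
      have heb := divmod_mul_add s (s-1) a hs0 hi
      have hdaq : a/s = 0 := Nat.div_eq_of_lt hi
      have hmaq : a%s = a := Nat.mod_eq_of_lt hi
      rw [hshape] at *
      omega
    -- a = i + s*s - s, b = i (i < s)
    · have hshape : b + s*s - s = s*(s-1) + b := by omega
      have hea := divmod_mul_add s (s-1) b hs0 hi
      have hdbq : b/s = 0 := Nat.div_eq_of_lt hi
      have hmbq : b%s = b := Nat.mod_eq_of_lt hi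
      rw [hshape] at *
      omega
  · rintro ⟨hm, (hadj | ⟨hsum, hz⟩)⟩
    · have h1 : a % s = b % s := hm
      rcases hadj with hba | hab
      -- a/s = b/s + 1, so a = b + s : witness i := b
      · left
        have hc : s*(b/s+1) = s*(b/s) + s := by ring
        have habs : a = b + s := by
          have h2 : s*(a/s) = s*(b/s+1) := by rw [hba]
          omega
        exact ⟨b, by omega, Or.inl ⟨by omega, rfl⟩⟩
      -- b = a + s : witness i := a
      · left
        have hc : s*(a/s+1) = s*(a/s) + s := by ring
        have habs : b = a + s := by
          have h2 : s*(b/s) = s*(a/s+1) := by rw [hab]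
          omega
        exact ⟨a, by omega, Or.inr ⟨rfl, by omega⟩⟩
    · right
      rcases hz with hz | hz
      -- a/s = 0 : a = a%s < s, b/s = s-1
      · have hbq : b/s = s - 1 := by omega
        have h2 : s*(b/s) = s*(s-1) := by rw [hbq]
        have h0 : s*(a/s) = 0 := by rw [hz]; ring
        refine ⟨a, by omega, Or.inl ⟨rfl, by omega⟩⟩
      -- b/s = 0 : witness i := b
      · have haq : a/s = s - 1 := by omega
        have h2 : s*(a/s) = s*(s-1) := by rw [haq]
        have h0 : s*(b/s) = 0 := by rw [hz]; ring
        refine ⟨b, by omega, Or.inr ⟨by omega, rfl⟩⟩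

theorem decide_bne_iff (p q : Prop) [Decidable p] [Decidable q] :
    ((decide p != decide q) = true) ↔ ¬(p ↔ q) := by
  rw [bne_iff_ne, ne_eq, decide_eq_decide]

theorem core_if (E4 E3 E2 RH RV : Prop) [Decidable E4] [Decidable E3] [Decidable E2]
    [Decidable RH] [Decidable RV] (bo r1 r2 : Int)
    (hr : (¬E4 ∧ ¬E3 ∧ ¬E2) → r1 = r2)
    (hiff : (E4 ∨ E3 ∨ E2) ↔ (RH ∨ RV)) :
    (if E4 then bo else if E3 then bo else if E2 then bo else r1)
      = (if RH then bo else if RV then bo else r2) := by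
  by_cases h4 : E4 <;> by_cases h3 : E3 <;> by_cases h2 : E2 <;> by_cases hh : RH <;> by_cases hv : RV <;>
    simp only [h4, h3, h2, hh, hv, if_true, if_false] <;> tauto

set_option maxHeartbeats 1600000 in
theorem entry_eq (s : Nat) (hs : 1 ≤ s) (se bo : Int) (a b : Nat)
    (ha : a < 2*(s*s)) (hb : b < 2*(s*s)) :
    (if (∃ i < s, ((a=i∧b=i+s*s-s)∨(a=i+s*s-s∧b=i)∨(a=i*s∧b=(i+1)*s-1)∨(a=(i+1)*s-1∧b=i*s)
          ∨(a=i+s*s∧b=i+s*s-s+s*s)∨(a=i+s*s-s+s*s∧b=i+s*s)∨(a=i*s+s*s∧b=(i+1)*s-1+s*s)∨(a=(i+1)*s-1+s*s∧b=i*s+s*s)))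
     then bo else
     if (∃ i < s*s-s, ((a=i+s∧b=i)∨(a=i∧b=i+s)∨(a=i+s+s*s∧b=i+s*s)∨(a=i+s*s∧b=i+s+s*s))) then bo else
     if (∃ i < s*s-1, (i+1)%s ≠ 0 ∧ ((a=i∧b=i+1)∨(a=i+1∧b=i)∨(a=i+s*s∧b=i+1+s*s)∨(a=i+1+s*s∧b=i+s*s))) then bo else
     if a = b ∧ a < s*s then se else if a = b ∧ s*s ≤ a ∧ a < s*s + s*s then -1*se else 0)
    = pvEntry ↑s se bo ((s*s : Nat) : Int) ↑a ↑b := by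
  have hs0 : 0 < s := hs
  have hss : s ≤ s*s := Nat.le_mul_of_pos_left s hs0
  have hss1 : 1 ≤ s*s := by omega
  unfold pvEntry
  dsimp only
  by_cases hA : a < s*s <;> by_cases hB : b < s*s
  -- case 1 : both in the up block
  · have hAi : ((a:Int) < ((s*s : Nat):Int)) := by exact_mod_cast hA
    have hBi : ((b:Int) < ((s*s : Nat):Int)) := by exact_mod_cast hB
    rw [if_neg ((decide_bne_iff _ _).not.mpr (fun h => h (iff_of_true hAi hBi)))]
    rw [if_pos hAi, if_pos hBi]
    rw [PySem.Int.floordiv_natCast, PySem.Int.mod_natCast,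
        PySem.Int.floordiv_natCast, PySem.Int.mod_natCast]
    have e4 : (∃ i < s, ((a=i∧b=i+s*s-s)∨(a=i+s*s-s∧b=i)∨(a=i*s∧b=(i+1)*s-1)∨(a=(i+1)*s-1∧b=i*s)
          ∨(a=i+s*s∧b=i+s*s-s+s*s)∨(a=i+s*s-s+s*s∧b=i+s*s)∨(a=i*s+s*s∧b=(i+1)*s-1+s*s)∨(a=(i+1)*s-1+s*s∧b=i*s+s*s)))
        ↔ ((∃ i < s, ((a=i∧b=i+s*s-s)∨(a=i+s*s-s∧b=i))) ∨ (∃ i < s, ((a=i*s∧b=(i+1)*s-1)∨(a=(i+1)*s-1∧b=i*s)))) := by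
      constructor
      · rintro ⟨i, hi, hc⟩
        have hp1 : i*s < s*s := (Nat.mul_lt_mul_right hs0).mpr hi
        have hp2 : (i+1)*s ≤ s*s := Nat.mul_le_mul (by omega) (le_refl s)
        rcases hc with hc|hc|hc|hc|hc|hc|hc|hc
        · exact Or.inl ⟨i, hi, Or.inl hc⟩
        · exact Or.inl ⟨i, hi, Or.inr hc⟩
        · exact Or.inr ⟨i, hi, Or.inl hc⟩
        · exact Or.inr ⟨i, hi, Or.inr hc⟩
        all_goals exact absurd hc (by omega)
      · rintro (⟨i, hi, hc | hc⟩ | ⟨i, hi, hc | hc⟩)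
        · exact ⟨i, hi, Or.inl hc⟩
        · exact ⟨i, hi, Or.inr (Or.inl hc)⟩
        · exact ⟨i, hi, Or.inr (Or.inr (Or.inl hc))⟩
        · exact ⟨i, hi, Or.inr (Or.inr (Or.inr (Or.inl hc)))⟩
    have e3 : (∃ i < s*s-s, ((a=i+s∧b=i)∨(a=i∧b=i+s)∨(a=i+s+s*s∧b=i+s*s)∨(a=i+s*s∧b=i+s+s*s)))
        ↔ (∃ i < s*s-s, ((a=i+s∧b=i)∨(a=i∧b=i+s))) := by
      constructor
      · rintro ⟨i, hi, hc | hc | hc | hc⟩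
        · exact ⟨i, hi, Or.inl hc⟩
        · exact ⟨i, hi, Or.inr hc⟩
        · exact absurd hc (by omega)
        · exact absurd hc (by omega)
      · rintro ⟨i, hi, hc | hc⟩
        · exact ⟨i, hi, Or.inl hc⟩
        · exact ⟨i, hi, Or.inr (Or.inl hc)⟩
    have e2 : (∃ i < s*s-1, (i+1)%s ≠ 0 ∧ ((a=i∧b=i+1)∨(a=i+1∧b=i)∨(a=i+s*s∧b=i+1+s*s)∨(a=i+1+s*s∧b=i+s*s)))
        ↔ (∃ i < s*s-1, (i+1)%s ≠ 0 ∧ ((a=i∧b=i+1)∨(a=i+1∧b=i))) := by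
      constructor
      · rintro ⟨i, hi, hm, hc | hc | hc | hc⟩
        · exact ⟨i, hi, hm, Or.inl hc⟩
        · exact ⟨i, hi, hm, Or.inr hc⟩
        · exact absurd hc (by omega)
        · exact absurd hc (by omega)
      · rintro ⟨i, hi, hm, hc | hc⟩
        · exact ⟨i, hi, hm, Or.inl hc⟩
        · exact ⟨i, hi, hm, Or.inr (Or.inl hc)⟩
    rw [if_congr e4 rfl rfl, if_congr e3 rfl rfl, if_congr e2 rfl rfl]
    have hH := horiz_iff s a b hs hA hB
    have hV := vert_iff s a b hs hA hB
    have habs : (|((a % s : Nat):Int) - ((b % s : Nat):Int)| = (1:Int))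
        ↔ (((a % s : Nat):Int) - ((b % s : Nat):Int) = 1 ∨ ((a % s : Nat):Int) - ((b % s : Nat):Int) = -1) :=
      abs_eq (by norm_num)
    have habs2 : (|((a / s : Nat):Int) - ((b / s : Nat):Int)| = (1:Int))
        ↔ (((a / s : Nat):Int) - ((b / s : Nat):Int) = 1 ∨ ((a / s : Nat):Int) - ((b / s : Nat):Int) = -1) :=
      abs_eq (by norm_num)
    have hHint : (((a / s : Nat):Int) = ((b / s : Nat):Int)
          ∧ (|((a % s : Nat):Int) - ((b % s : Nat):Int)| = 1
             ∨ (per = true ∧ ((a % s : Nat):Int) + ((b % s : Nat):Int) = ↑s - 1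
                ∧ (((a % s : Nat):Int) = 0 ∨ ((b % s : Nat):Int) = 0))))
        ↔ (a/s = b/s ∧ ((a%s = b%s+1 ∨ b%s = a%s+1) ∨ (a%s + b%s = s-1 ∧ (a%s = 0 ∨ b%s = 0)))) := by
      rw [habs]; simp only [per, true_and]; omega
    have hVint : (((a % s : Nat):Int) = ((b % s : Nat):Int)
          ∧ (|((a / s : Nat):Int) - ((b / s : Nat):Int)| = 1
             ∨ (per = true ∧ ((a / s : Nat):Int) + ((b / s : Nat):Int) = ↑s - 1
                ∧ (((a / s : Nat):Int) = 0 ∨ ((b / s : Nat):Int) = 0))))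
        ↔ (a%s = b%s ∧ ((a/s = b/s+1 ∨ b/s = a/s+1) ∨ (a/s + b/s = s-1 ∧ (a/s = 0 ∨ b/s = 0)))) := by
      rw [habs2]; simp only [per, true_and]; omega
    have hRH := hHint.trans hH.symm
    have hRV := hVint.trans hV.symm
    apply core_if
    · intro _
      split_ifs <;> first | rfl | omega
    · rw [hRH, hRV]
      constructor
      · rintro ((h | h) | h | h)
        · exact Or.inr (Or.inr h)
        · exact Or.inl (Or.inr h)
        · exact Or.inr (Or.inl h)
        · exact Or.inl (Or.inl h)
      · rintro ((h | h) | h | h)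
        · exact Or.inr (Or.inr h)
        · exact Or.inl (Or.inr h)
        · exact Or.inr (Or.inl h)
        · exact Or.inl (Or.inl h)
  -- case 2 : a lo, b hi — cross block, everything 0
  · have hAi : ((a:Int) < ((s*s : Nat):Int)) := by exact_mod_cast hA
    have hBi : ¬ ((b:Int) < ((s*s : Nat):Int)) := by
      rw [Nat.cast_lt]; exact hB
    rw [if_pos ((decide_bne_iff _ _).mpr (fun hiff => hBi (hiff.mp hAi)))]
    have n4 : ¬ (∃ i < s, ((a=i∧b=i+s*s-s)∨(a=i+s*s-s∧b=i)∨(a=i*s∧b=(i+1)*s-1)∨(a=(i+1)*s-1∧b=i*s)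
          ∨(a=i+s*s∧b=i+s*s-s+s*s)∨(a=i+s*s-s+s*s∧b=i+s*s)∨(a=i*s+s*s∧b=(i+1)*s-1+s*s)∨(a=(i+1)*s-1+s*s∧b=i*s+s*s))) := by
      rintro ⟨i, hi, hc⟩
      have hp1 : i*s < s*s := (Nat.mul_lt_mul_right hs0).mpr hi
      have hp2 : (i+1)*s ≤ s*s := Nat.mul_le_mul (by omega) (le_refl s)
      have hp3 : 1 ≤ (i+1)*s := by have := Nat.mul_pos (show 0 < i+1 by omega) hs0; omega
      omega
    have n3 : ¬ (∃ i < s*s-s, ((a=i+s∧b=i)∨(a=i∧b=i+s)∨(a=i+s+s*s∧b=i+s*s)∨(a=i+s*s∧b=i+s+s*s))) := by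
      rintro ⟨i, hi, hc⟩; omega
    have n2 : ¬ (∃ i < s*s-1, (i+1)%s ≠ 0 ∧ ((a=i∧b=i+1)∨(a=i+1∧b=i)∨(a=i+s*s∧b=i+1+s*s)∨(a=i+1+s*s∧b=i+s*s))) := by
      rintro ⟨i, hi, hm, hc⟩; omega
    rw [if_neg n4, if_neg n3, if_neg n2, if_neg (by omega), if_neg (by omega)]
  -- case 3 : a hi, b lo — cross block, everything 0
  · have hAi : ¬ ((a:Int) < ((s*s : Nat):Int)) := by
      rw [Nat.cast_lt]; exact hA
    have hBi : ((b:Int) < ((s*s : Nat):Int)) := by exact_mod_cast hB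
    rw [if_pos ((decide_bne_iff _ _).mpr (fun hiff => hAi (hiff.mpr hBi)))]
    have n4 : ¬ (∃ i < s, ((a=i∧b=i+s*s-s)∨(a=i+s*s-s∧b=i)∨(a=i*s∧b=(i+1)*s-1)∨(a=(i+1)*s-1∧b=i*s)
          ∨(a=i+s*s∧b=i+s*s-s+s*s)∨(a=i+s*s-s+s*s∧b=i+s*s)∨(a=i*s+s*s∧b=(i+1)*s-1+s*s)∨(a=(i+1)*s-1+s*s∧b=i*s+s*s))) := by
      rintro ⟨i, hi, hc⟩
      have hp1 : i*s < s*s := (Nat.mul_lt_mul_right hs0).mpr hi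
      have hp2 : (i+1)*s ≤ s*s := Nat.mul_le_mul (by omega) (le_refl s)
      have hp3 : 1 ≤ (i+1)*s := by have := Nat.mul_pos (show 0 < i+1 by omega) hs0; omega
      omega
    have n3 : ¬ (∃ i < s*s-s, ((a=i+s∧b=i)∨(a=i∧b=i+s)∨(a=i+s+s*s∧b=i+s*s)∨(a=i+s*s∧b=i+s+s*s))) := by
      rintro ⟨i, hi, hc⟩; omega
    have n2 : ¬ (∃ i < s*s-1, (i+1)%s ≠ 0 ∧ ((a=i∧b=i+1)∨(a=i+1∧b=i)∨(a=i+s*s∧b=i+1+s*s)∨(a=i+1+s*s∧b=i+s*s))) := by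
      rintro ⟨i, hi, hm, hc⟩; omega
    rw [if_neg n4, if_neg n3, if_neg n2, if_neg (by omega), if_neg (by omega)]
  -- case 4 : both in the down block
  · have hAi : ¬ ((a:Int) < ((s*s : Nat):Int)) := by
      rw [Nat.cast_lt]; exact hA
    have hBi : ¬ ((b:Int) < ((s*s : Nat):Int)) := by
      rw [Nat.cast_lt]; exact hB
    rw [if_neg ((decide_bne_iff _ _).not.mpr (fun h => h (iff_of_false hAi hBi)))]
    rw [if_neg hAi, if_neg hBi]
    have ea : ((a:Int) - ((s*s : Nat):Int)) = ((a - s*s : Nat) : Int) := by omega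
    have eb : ((b:Int) - ((s*s : Nat):Int)) = ((b - s*s : Nat) : Int) := by omega
    rw [ea, eb]
    rw [PySem.Int.floordiv_natCast, PySem.Int.mod_natCast,
        PySem.Int.floordiv_natCast, PySem.Int.mod_natCast]
    have hA2 : a - s*s < s*s := by omega
    have hB2 : b - s*s < s*s := by omega
    have e4 : (∃ i < s, ((a=i∧b=i+s*s-s)∨(a=i+s*s-s∧b=i)∨(a=i*s∧b=(i+1)*s-1)∨(a=(i+1)*s-1∧b=i*s)
          ∨(a=i+s*s∧b=i+s*s-s+s*s)∨(a=i+s*s-s+s*s∧b=i+s*s)∨(a=i*s+s*s∧b=(i+1)*s-1+s*s)∨(a=(i+1)*s-1+s*s∧b=i*s+s*s)))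
        ↔ ((∃ i < s, ((a-s*s=i∧b-s*s=i+s*s-s)∨(a-s*s=i+s*s-s∧b-s*s=i)))
           ∨ (∃ i < s, ((a-s*s=i*s∧b-s*s=(i+1)*s-1)∨(a-s*s=(i+1)*s-1∧b-s*s=i*s)))) := by
      constructor
      · rintro ⟨i, hi, hc⟩
        have hp1 : i*s < s*s := (Nat.mul_lt_mul_right hs0).mpr hi
        have hp2 : (i+1)*s ≤ s*s := Nat.mul_le_mul (by omega) (le_refl s)
        have hp3 : 1 ≤ (i+1)*s := by have := Nat.mul_pos (show 0 < i+1 by omega) hs0; omega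
        rcases hc with hc|hc|hc|hc|hc|hc|hc|hc
        · exact absurd hc (by omega)
        · exact absurd hc (by omega)
        · exact absurd hc (by omega)
        · exact absurd hc (by omega)
        · exact Or.inl ⟨i, hi, Or.inl ⟨by omega, by omega⟩⟩
        · exact Or.inl ⟨i, hi, Or.inr ⟨by omega, by omega⟩⟩
        · exact Or.inr ⟨i, hi, Or.inl ⟨by omega, by omega⟩⟩
        · exact Or.inr ⟨i, hi, Or.inr ⟨by omega, by omega⟩⟩
      · rintro (⟨i, hi, hc | hc⟩ | ⟨i, hi, hc | hc⟩)
        · exact ⟨i, hi, Or.inr (Or.inr (Or.inr (Or.inr (Or.inl ⟨by omega, by omega⟩))))⟩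
        · exact ⟨i, hi, Or.inr (Or.inr (Or.inr (Or.inr (Or.inr (Or.inl ⟨by omega, by omega⟩)))))⟩
        · have hp3 : 1 ≤ (i+1)*s := by have := Nat.mul_pos (show 0 < i+1 by omega) hs0; omega
          exact ⟨i, hi, Or.inr (Or.inr (Or.inr (Or.inr (Or.inr (Or.inr (Or.inl ⟨by omega, by omega⟩))))))⟩
        · have hp3 : 1 ≤ (i+1)*s := by have := Nat.mul_pos (show 0 < i+1 by omega) hs0; omega
          exact ⟨i, hi, Or.inr (Or.inr (Or.inr (Or.inr (Or.inr (Or.inr (Or.inr ⟨by omega, by omega⟩))))))⟩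
    have e3 : (∃ i < s*s-s, ((a=i+s∧b=i)∨(a=i∧b=i+s)∨(a=i+s+s*s∧b=i+s*s)∨(a=i+s*s∧b=i+s+s*s)))
        ↔ (∃ i < s*s-s, ((a-s*s=i+s∧b-s*s=i)∨(a-s*s=i∧b-s*s=i+s))) := by
      constructor
      · rintro ⟨i, hi, hc | hc | hc | hc⟩
        · exact absurd hc (by omega)
        · exact absurd hc (by omega)
        · exact ⟨i, hi, Or.inl ⟨by omega, by omega⟩⟩
        · exact ⟨i, hi, Or.inr ⟨by omega, by omega⟩⟩
      · rintro ⟨i, hi, hc | hc⟩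
        · exact ⟨i, hi, Or.inr (Or.inr (Or.inl ⟨by omega, by omega⟩))⟩
        · exact ⟨i, hi, Or.inr (Or.inr (Or.inr ⟨by omega, by omega⟩))⟩
    have e2 : (∃ i < s*s-1, (i+1)%s ≠ 0 ∧ ((a=i∧b=i+1)∨(a=i+1∧b=i)∨(a=i+s*s∧b=i+1+s*s)∨(a=i+1+s*s∧b=i+s*s)))
        ↔ (∃ i < s*s-1, (i+1)%s ≠ 0 ∧ ((a-s*s=i∧b-s*s=i+1)∨(a-s*s=i+1∧b-s*s=i))) := by
      constructor
      · rintro ⟨i, hi, hm, hc | hc | hc | hc⟩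
        · exact absurd hc (by omega)
        · exact absurd hc (by omega)
        · exact ⟨i, hi, hm, Or.inl ⟨by omega, by omega⟩⟩
        · exact ⟨i, hi, hm, Or.inr ⟨by omega, by omega⟩⟩
      · rintro ⟨i, hi, hm, hc | hc⟩
        · exact ⟨i, hi, hm, Or.inr (Or.inr (Or.inl ⟨by omega, by omega⟩))⟩
        · exact ⟨i, hi, hm, Or.inr (Or.inr (Or.inr ⟨by omega, by omega⟩))⟩
    rw [if_congr e4 rfl rfl, if_congr e3 rfl rfl, if_congr e2 rfl rfl]
    have hH := horiz_iff s (a-s*s) (b-s*s) hs hA2 hB2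
    have hV := vert_iff s (a-s*s) (b-s*s) hs hA2 hB2
    have habs : (|(((a-s*s) % s : Nat):Int) - (((b-s*s) % s : Nat):Int)| = (1:Int))
        ↔ ((((a-s*s) % s : Nat):Int) - (((b-s*s) % s : Nat):Int) = 1 ∨ (((a-s*s) % s : Nat):Int) - (((b-s*s) % s : Nat):Int) = -1) :=
      abs_eq (by norm_num)
    have habs2 : (|(((a-s*s) / s : Nat):Int) - (((b-s*s) / s : Nat):Int)| = (1:Int))
        ↔ ((((a-s*s) / s : Nat):Int) - (((b-s*s) / s : Nat):Int) = 1 ∨ (((a-s*s) / s : Nat):Int) - (((b-s*s) / s : Nat):Int) = -1) :=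
      abs_eq (by norm_num)
    have hHint : ((((a-s*s) / s : Nat):Int) = (((b-s*s) / s : Nat):Int)
          ∧ (|(((a-s*s) % s : Nat):Int) - (((b-s*s) % s : Nat):Int)| = 1
             ∨ (per = true ∧ (((a-s*s) % s : Nat):Int) + (((b-s*s) % s : Nat):Int) = ↑s - 1
                ∧ ((((a-s*s) % s : Nat):Int) = 0 ∨ (((b-s*s) % s : Nat):Int) = 0))))
        ↔ ((a-s*s)/s = (b-s*s)/s ∧ (((a-s*s)%s = (b-s*s)%s+1 ∨ (b-s*s)%s = (a-s*s)%s+1)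
            ∨ ((a-s*s)%s + (b-s*s)%s = s-1 ∧ ((a-s*s)%s = 0 ∨ (b-s*s)%s = 0)))) := by
      rw [habs]; simp only [per, true_and]; omega
    have hVint : ((((a-s*s) % s : Nat):Int) = (((b-s*s) % s : Nat):Int)
          ∧ (|(((a-s*s) / s : Nat):Int) - (((b-s*s) / s : Nat):Int)| = 1
             ∨ (per = true ∧ (((a-s*s) / s : Nat):Int) + (((b-s*s) / s : Nat):Int) = ↑s - 1
                ∧ ((((a-s*s) / s : Nat):Int) = 0 ∨ (((b-s*s) / s : Nat):Int) = 0))))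
        ↔ ((a-s*s)%s = (b-s*s)%s ∧ (((a-s*s)/s = (b-s*s)/s+1 ∨ (b-s*s)/s = (a-s*s)/s+1)
            ∨ ((a-s*s)/s + (b-s*s)/s = s-1 ∧ ((a-s*s)/s = 0 ∨ (b-s*s)/s = 0)))) := by
      rw [habs2]; simp only [per, true_and]; omega
    have hRH := hHint.trans hH.symm
    have hRV := hVint.trans hV.symm
    apply core_if
    · intro _
      split_ifs <;> first | rfl | omega | ring
    · rw [hRH, hRV]
      constructor
      · rintro ((h | h) | h | h)
        · exact Or.inr (Or.inr h)
        · exact Or.inl (Or.inr h)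
        · exact Or.inr (Or.inl h)
        · exact Or.inl (Or.inl h)
      · rintro ((h | h) | h | h)
        · exact Or.inr (Or.inr h)
        · exact Or.inl (Or.inr h)
        · exact Or.inr (Or.inl h)
        · exact Or.inl (Or.inl h)

theorem matrix_eq (N : Nat) (m : List (List Int)) (hg : GoodM N m) (g : Nat → Nat → Int)
    (h : ∀ a b, a < N → b < N → giM m a b = g a b) :
    m = (List.range N).map (fun a => (List.range N).map (fun b => g a b)) := by
  obtain ⟨hl, hr⟩ := hg
  apply List.ext_getElem (by simp [hl])
  intro i h1 h2
  have hiN : i < N := by omega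
  rw [List.getElem_map, List.getElem_range]
  have hrow : (m[i]'h1).length = N := hr _ (List.getElem_mem h1)
  apply List.ext_getElem (by simp [hrow])
  intro j h3 h4
  rw [List.getElem_map, List.getElem_range]
  have hj : j < N := by omega
  have hval := h i j hiN hj
  unfold giM at hval
  rw [List.getD_eq_getElem (l := m) (d := []) h1] at hval
  rw [List.getD_eq_getElem (l := m[i]'h1) (d := 0) (by omega)] at hval
  exact hval

set_option maxHeartbeats 1600000 in
theorem TwoDimSpin_main : ∀ (size self_e bond : Int), 0 ≤ size →
    TwoDimSpin size self_e bond = TwoDimSpin_alt size self_e bond := by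
  intro size se bo hsz
  obtain ⟨s, rfl⟩ : ∃ s : Nat, size = (s:Int) := ⟨size.toNat, by omega⟩
  rcases Nat.eq_zero_or_pos s with hs0 | hs
  · subst hs0
    rfl
  unfold TwoDimSpin TwoDimSpin_alt
  dsimp only
  have hss1 : 0 < s*s := Nat.mul_pos hs hs
  have hsleL : s ≤ s*s := Nat.le_mul_of_pos_left s hs
  have hc2 : (2 * ((s:Int)*(s:Int))) = ((2*(s*s) : Nat) : Int) := by push_cast; ring
  have hcL1 : ((s:Int)*(s:Int) - 1) = ((s*s - 1 : Nat) : Int) := by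
    rw [Nat.cast_sub hss1]; push_cast; ring
  have hcLs : ((s:Int)*(s:Int) - (s:Int)) = ((s*s - s : Nat) : Int) := by
    rw [Nat.cast_sub hsleL]; push_cast; ring
  have hcL : ((s:Int)*(s:Int)) = ((s*s : Nat) : Int) := by push_cast; ring
  rw [hc2, hcL1, hcLs, hcL]
  rw [PySem.List.pyRange_zero_natCast, PySem.List.pyRange_zero_natCast,
      PySem.List.pyRange_zero_natCast, PySem.List.pyRange_zero_natCast]
  rw [show PySem.List.pyRange 0 (s:Int) = (List.range s).map (fun k : Nat => (k:Int)) from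
        PySem.List.pyRange_zero_natCast s]
  rw [initChar]
  dsimp only
  simp only [List.length_map, List.length_range]
  simp only [per, if_pos]
  have hG0 : GoodM (2*(s*s)) (List.replicate (2*(s*s)) (List.replicate (2*(s*s)) (0:Int))) :=
    goodM_replicate _
  have hG1 : GoodM (2*(s*s)) (((List.range (s*s)).map (fun t : Nat => (t:Int))).foldl
      (aBody1 ((s*s : Nat) : Int) se (-1*se)) (List.replicate (2*(s*s)) (List.replicate (2*(s*s)) (0:Int)))) :=
    goodM_foldl _ (fun m x hgm => goodM_aBody1 se (-1*se) m x hgm) _ _ hG0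
  have hG2 : GoodM (2*(s*s)) (((List.range (s*s-1)).map (fun t : Nat => (t:Int))).foldl
      (aBody2 (s:Int) ((s*s : Nat) : Int) bo) _) :=
    goodM_foldl _ (fun m x hgm => goodM_aBody2 s bo m x hgm) _ _ hG1
  have hG3 : GoodM (2*(s*s)) (((List.range (s*s-s)).map (fun t : Nat => (t:Int))).foldl
      (aBody3 (s:Int) ((s*s : Nat) : Int) bo) _) :=
    goodM_foldl _ (fun m x hgm => goodM_aBody3 s bo m x hgm) _ _ hG2
  have hG4 : GoodM (2*(s*s)) (((List.range s).map (fun t : Nat => (t:Int))).foldl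
      (aBody4 (s:Int) ((s*s : Nat) : Int) bo) _) :=
    goodM_foldl _ (fun m x hgm => goodM_aBody4 s bo m x hgm) _ _ hG3
  simp only [List.map_map]
  simp only [Function.comp_def]
  simp only [List.nil_append] at hG1 hG2 hG3 hG4 ⊢
  apply matrix_eq _ _ hG4
  intro a b ha hb
  rw [char4 s (s*s) hs rfl bo s (le_refl s) _ hG3 a b ha hb]
  rw [char3 s (s*s) bo (s*s-s) (by omega) _ hG2 a b ha hb]
  rw [char2 s (s*s) bo (s*s-1) (by omega) _ hG1 a b ha hb]
  rw [char1 (s*s) se (-1*se) (s*s) (le_refl _) _ hG0 a b ha hb]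
  rw [giM_replicate]
  exact entry_eq s hs se bo a b ha hb

-- ===== VERDICT (by name: the statement is the Claim_ definition above) =====
theorem TwoDimSpin_spec : Claim_equal_TwoDimSpin := by
  intro size self_e bond _ hpre
  exact TwoDimSpin_main size self_e bond hpre
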